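-- pv_equiv track=rewrite | github.com/damoc1es/AdventOfCode-2021 | src/day13.py | rendered_dots
-- ===== SOURCE A (Python) =====
-- def rendered_dots(points):
--     max_x = max([x for (x, y) in points])
--     max_y = max([y for (x, y) in points])
--     Matrix = [['⬛'] * (max_y + 1) for _ in range(max_x + 1)]
--     for (x, y) in points:
--         Matrix[x][y] = '⬜'
--
--     string = "\n"
--     for i in range(len(Matrix)):
--         for j in range(len(Matrix[i])):
--             string += Matrix[i][j]
--         string += '\n'
--     return string
-- ===== SOURCE B (Python) =====
-- def rendered_dots(points):
--     max_x = max([x for (x, y) in points])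
--     max_y = max([y for (x, y) in points])
--     C = max_y + 1
--     pieces = []
--     prev = 0
--     for p in sorted({x * C + y for (x, y) in points}):
--         pieces.append('\u2b1b' * (p - prev))
--         pieces.append('\u2b1c')
--         prev = p + 1
--     pieces.append('\u2b1b' * ((max_x + 1) * C - prev))
--     cells = ''.join(pieces)
--     return '\n' + ''.join(cells[i * C:(i + 1) * C] + '\n' for i in range(max_x + 1))
-- ===== Notes on version B (the rewrite author's own statement) =====
-- stated objective: faster
-- what changed: B never builds or traverses a grid cell by cell: it linearizes each dot to a flat index x*C+y, sorts the distinct indices, emits the picture as runs of black cells between consecutive dots via string repetition (run-length construction over sorted sparse data), and finally slices the flat cell string into rows.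
-- outside the precondition, e.g. on rendered_dots([(-1, 1), (1, 0)]): A returns '\n⬛⬛\n⬜⬜\n', B returns '\n⬜⬛\n⬛⬜\n'; on rendered_dots([]): A raises ValueError, B raises ValueError
import Mathlib
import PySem

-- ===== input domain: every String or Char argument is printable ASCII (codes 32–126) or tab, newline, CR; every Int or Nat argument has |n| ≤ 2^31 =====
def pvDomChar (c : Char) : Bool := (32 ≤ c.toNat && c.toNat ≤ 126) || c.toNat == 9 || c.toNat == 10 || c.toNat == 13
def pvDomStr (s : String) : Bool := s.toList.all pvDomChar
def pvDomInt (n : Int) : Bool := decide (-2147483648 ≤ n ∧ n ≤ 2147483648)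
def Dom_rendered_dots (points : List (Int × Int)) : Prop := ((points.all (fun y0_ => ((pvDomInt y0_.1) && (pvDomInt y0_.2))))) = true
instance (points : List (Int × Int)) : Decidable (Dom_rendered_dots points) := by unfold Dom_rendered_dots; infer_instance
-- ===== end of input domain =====

-- B renders by sorting the linearized dot positions and emitting runs of black cells between consecutive
-- dots, then slices the flat cell string into rows — no grid is built or traversed cell by cell.

-- ===== PORT A =====
-- Matrix[x][y] = '⬜' with Python's index semantics (negative indices count from the end); in range under Pre_
def rdPlot (m : List (List Char)) (p : Int × Int) : List (List Char) :=
  PySem.List.pySetD m p.1 (PySem.List.pySetD (PySem.List.pyGetD m p.1 []) p.2 '⬜')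

-- the two nested rendering loops of A; the string is accumulated as List Char
-- (Lean's own String.append is kernel-opaque) and wrapped into a String at the end
def rdRender (Matrix : List (List Char)) : List Char :=
  (PySem.List.pyRange 0 (PySem.List.len Matrix)).foldl
    (fun acc i =>
      ((PySem.List.pyRange 0 (PySem.List.len (PySem.List.pyGetD Matrix i []))).foldl
          (fun acc2 j => acc2 ++ [PySem.List.pyGetD (PySem.List.pyGetD Matrix i []) j ' ']) acc)
        ++ ['\n'])
    ['\n']

def rendered_dots (points : List (Int × Int)) : String :=
  match PySem.List.max? (points.map (fun p => p.1)) (fun x => x),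
        PySem.List.max? (points.map (fun p => p.2)) (fun x => x) with
  | some max_x, some max_y =>
    String.ofList (rdRender (points.foldl rdPlot
      ((PySem.List.pyRange 0 (max_x + 1)).map (fun _ => PySem.List.pyRepeat ['⬛'] (max_y + 1)))))
  | _, _ => ""  -- unreachable under Pre_: max([]) raises ValueError

-- ===== PORT B =====
def rendered_dots_alt (points : List (Int × Int)) : String :=
  match PySem.List.max? (points.map (fun p => p.1)) (fun x => x) with
  | none => ""  -- unreachable under Pre_: max([]) raises ValueError
  | some max_x =>
    match PySem.List.max? (points.map (fun p => p.2)) (fun x => x) with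
    | none => ""
    | some max_y =>
    let C := max_y + 1
    let ps := PySem.List.sorted
        (PySem.Set.ofList (points.map (fun p => p.1 * C + p.2))) (fun x => x) false
    let st := ps.foldl
        (fun (st : List Char × Int) p =>
          (st.1 ++ PySem.List.pyRepeat ['⬛'] (p - st.2) ++ ['⬜'], p + 1))
        (([] : List Char), 0)
    let cells := st.1 ++ PySem.List.pyRepeat ['⬛'] ((max_x + 1) * C - st.2)
    String.ofList ('\n' ::
      (PySem.List.pyRange 0 (max_x + 1)).flatMap (fun i =>
        PySem.List.slice cells (some (i * C)) (some ((i + 1) * C)) ++ ['\n']))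

-- ===== PRECONDITION & SPEC =====
-- Pre_ restricts to the task's natural domain: a nonempty list (max([]) raises ValueError in A) of
-- NONNEGATIVE grid coordinates. A point with a negative coordinate is off the grid being rendered: there
-- A raises IndexError or plots at the wrapped row/column max+1+coord, B renders yet another picture, and
-- neither value is a rendering anyone would specify, so such inputs are excluded (see cites).
def Pre_rendered_dots (points : List (Int × Int)) : Prop :=
  points ≠ [] ∧ ∀ p ∈ points, 0 ≤ p.1 ∧ 0 ≤ p.2
instance (points : List (Int × Int)) : Decidable (Pre_rendered_dots points) := by
  unfold Pre_rendered_dots; infer_instance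

def pvWitness_rendered_dots : (List (Int × Int)) := [(0, 1), (2, 0)]

def Spec_rendered_dots (points : List (Int × Int)) (out : String) : Prop := out = rendered_dots_alt points
instance (points : List (Int × Int)) (out : String) : Decidable (Spec_rendered_dots points out) := by unfold Spec_rendered_dots; infer_instance

-- ===== CLAIM (what is proved, stated in full; the proofs are below) =====
def Claim_equal_rendered_dots : Prop := ∀ (points : List (Int × Int)), Dom_rendered_dots points → Pre_rendered_dots points → Spec_rendered_dots points (rendered_dots points)

-- ===== LEMMAS AND PROOFS =====

-- an R×C matrix of cells given pointwise
def rdMk2 (R C : Nat) (f : Nat → Nat → Char) : List (List Char) :=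
  (List.range R).map (fun i => (List.range C).map (fun j => f i j))

theorem rdMk2_congr {R C : Nat} {f g : Nat → Nat → Char}
    (h : ∀ i j, i < R → j < C → f i j = g i j) : rdMk2 R C f = rdMk2 R C g := by
  unfold rdMk2
  apply List.map_congr_left
  intro i hi
  apply List.map_congr_left
  intro j hj
  exact h i j (List.mem_range.mp hi) (List.mem_range.mp hj)

theorem rdPlot_mk2 {R C : Nat} {f : Nat → Nat → Char} {x y : Int}
    (hx0 : 0 ≤ x) (hxR : x < R) (hy0 : 0 ≤ y) (hyC : y < C) :
    rdPlot (rdMk2 R C f) (x, y)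
      = rdMk2 R C (fun i j => if i = x.toNat ∧ j = y.toNat then '⬜' else f i j) := by
  have hxR' : x.toNat < R := by omega
  have hyC' : y.toNat < C := by omega
  unfold rdPlot
  rw [PySem.List.pySetD_of_nonneg _ _ hx0,
      PySem.List.pyGetD_eq_getElem _ _ hx0 (by simp [rdMk2]; omega),
      PySem.List.pySetD_of_nonneg _ _ hy0]
  unfold rdMk2
  apply List.ext_getElem (by simp)
  intro i h1 h2
  rw [List.getElem_set]
  simp only [List.getElem_map, List.getElem_range]
  by_cases hix : x.toNat = i
  · subst hix
    rw [if_pos rfl]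
    apply List.ext_getElem (by simp)
    intro j h3 h4
    rw [List.getElem_set]
    simp only [List.getElem_map, List.getElem_range]
    by_cases hjy : y.toNat = j
    · rw [if_pos hjy, if_pos ⟨trivial, hjy.symm⟩]
    · rw [if_neg hjy, if_neg (fun hc => hjy hc.2.symm)]
  · rw [if_neg hix]
    symm
    apply List.map_congr_left
    intro j _
    rw [if_neg (fun hc => hix hc.1.symm)]

theorem rdFoldl_plot {R C : Nat} (ps : List (Int × Int)) (f : Nat → Nat → Char)
    (hps : ∀ p ∈ ps, 0 ≤ p.1 ∧ p.1 < R ∧ 0 ≤ p.2 ∧ p.2 < C) :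
    ps.foldl rdPlot (rdMk2 R C f)
      = rdMk2 R C (fun i j => if ((i : Int), (j : Int)) ∈ ps then '⬜' else f i j) := by
  induction ps generalizing f with
  | nil => simp
  | cons p tl ih =>
    obtain ⟨x, y⟩ := p
    have hp := hps (x, y) (List.mem_cons_self ..)
    simp only at hp
    simp only [List.foldl_cons]
    rw [rdPlot_mk2 hp.1 hp.2.1 hp.2.2.1 hp.2.2.2,
        ih _ (fun q hq => hps q (List.mem_cons_of_mem _ hq))]
    apply rdMk2_congr
    intro i j hi hj
    by_cases hmem : ((i : Int), (j : Int)) ∈ tl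
    · rw [if_pos hmem, if_pos (List.mem_cons_of_mem _ hmem)]
    · rw [if_neg hmem]
      by_cases hpe : ((i : Int), (j : Int)) = (x, y)
      · have h1 : (i : Int) = x := congrArg Prod.fst hpe
        have h2 : (j : Int) = y := congrArg Prod.snd hpe
        rw [if_pos ⟨by omega, by omega⟩, if_pos (by rw [hpe]; exact List.mem_cons_self ..)]
      · have hnxy : ¬ (i = x.toNat ∧ j = y.toNat) := by
          intro hc
          apply hpe
          have h1 : (i : Int) = x := by omega
          have h2 : (j : Int) = y := by omega
          rw [Prod.ext_iff]
          exact ⟨h1, h2⟩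
        rw [if_neg hnxy, if_neg (by simp [List.mem_cons, hpe, hmem])]

theorem rdRange_map {α : Type} (n : Int) (g : Int → α) :
    (PySem.List.pyRange 0 n).map g = (List.range n.toNat).map (fun (k : Nat) => g (k : Int)) := by
  rw [PySem.List.pyRange_one, List.map_map]
  simp only [Function.comp_def, zero_add, sub_zero]

theorem rdRange_flatMap {α : Type} (n : Int) (g : Int → List α) :
    (PySem.List.pyRange 0 n).flatMap g = (List.range n.toNat).flatMap (fun (k : Nat) => g (k : Int)) := by
  rw [PySem.List.pyRange_one, List.flatMap_map]
  simp only [zero_add, sub_zero]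

theorem rdRender_eq (M : List (List Char)) :
    rdRender M = '\n' :: M.flatMap (fun row => row ++ ['\n']) := by
  unfold rdRender
  have h1 : (PySem.List.pyRange 0 (PySem.List.len M)).foldl
      (fun acc i =>
        ((PySem.List.pyRange 0 (PySem.List.len (PySem.List.pyGetD M i []))).foldl
            (fun acc2 j => acc2 ++ [PySem.List.pyGetD (PySem.List.pyGetD M i []) j ' ']) acc)
          ++ ['\n'])
      ['\n']
    = M.foldl
        (fun acc row =>
          ((PySem.List.pyRange 0 (PySem.List.len row)).foldl
              (fun acc2 j => acc2 ++ [PySem.List.pyGetD row j ' ']) acc) ++ ['\n'])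
        ['\n'] :=
    PySem.List.foldl_pyRange_zero_pyGetD M []
      (fun acc row =>
        ((PySem.List.pyRange 0 (PySem.List.len row)).foldl
            (fun acc2 j => acc2 ++ [PySem.List.pyGetD row j ' ']) acc) ++ ['\n'])
      ['\n']
  rw [h1]
  have h2 : ∀ (row : List Char) (acc : List Char),
      ((PySem.List.pyRange 0 (PySem.List.len row)).foldl
          (fun acc2 j => acc2 ++ [PySem.List.pyGetD row j ' ']) acc) ++ ['\n']
        = acc ++ (row ++ ['\n']) := by
    intro row acc
    have := PySem.List.foldl_pyRange_zero_pyGetD row ' '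
      (fun (acc2 : List Char) (c : Char) => acc2 ++ [c]) acc
    rw [this, PySem.List.foldl_append_singleton_eq_self, List.append_assoc]
  have h3 := PySem.List.foldl_congr_mem
      (l := M) (init := (['\n'] : List Char))
      (f := fun acc row =>
        ((PySem.List.pyRange 0 (PySem.List.len row)).foldl
            (fun acc2 j => acc2 ++ [PySem.List.pyGetD row j ' ']) acc) ++ ['\n'])
      (g := fun acc row => acc ++ (row ++ ['\n']))
      (fun acc row _ => h2 row acc)
  rw [h3, PySem.List.foldl_append_eq_flatMap]
  rfl

-- the run-length emission over a strictly increasing list of positions is the pointwise indicator map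
theorem rdEmit (ps : List Int) (N : Int) (acc : List Char) (prev : Int)
    (h0 : 0 ≤ prev) (hsort : ps.Pairwise (· < ·))
    (hlo : ∀ p ∈ ps, prev ≤ p) (hhi : ∀ p ∈ ps, p < N) (hN : prev ≤ N) :
    (ps.foldl (fun (st : List Char × Int) p =>
        (st.1 ++ PySem.List.pyRepeat ['⬛'] (p - st.2) ++ ['⬜'], p + 1)) (acc, prev)).1
      ++ PySem.List.pyRepeat ['⬛']
          (N - (ps.foldl (fun (st : List Char × Int) p =>
            (st.1 ++ PySem.List.pyRepeat ['⬛'] (p - st.2) ++ ['⬜'], p + 1)) (acc, prev)).2)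
    = acc ++ (List.range' prev.toNat (N - prev).toNat).map
        (fun (k : Nat) => if ((k : Int) ∈ ps) then '⬜' else '⬛') := by
  induction ps generalizing acc prev with
  | nil =>
    simp only [List.foldl_nil, PySem.List.pyRepeat_singleton]
    rw [List.map_congr_left (g := fun _ => '⬛') (by intro k _; simp)]
    simp
  | cons p tl ih =>
    have hp_lo : prev ≤ p := hlo p (List.mem_cons_self ..)
    have hp_hi : p < N := hhi p (List.mem_cons_self ..)
    obtain ⟨hhead, htl⟩ := List.pairwise_cons.mp hsort
    simp only [List.foldl_cons]
    rw [ih (acc ++ PySem.List.pyRepeat ['⬛'] (p - prev) ++ ['⬜']) (p + 1)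
        (by omega) htl
        (fun q hq => by have := hhead q hq; omega)
        (fun q hq => hhi q (List.mem_cons_of_mem _ hq))
        (by omega)]
    have hsplit : (N - prev).toNat = (p - prev).toNat + ((N - (p + 1)).toNat + 1) := by omega
    rw [hsplit, ← List.range'_append_1, List.map_append]
    have hmid : prev.toNat + (p - prev).toNat = p.toNat := by omega
    rw [hmid, List.range'_succ, List.map_cons]
    have hseg1 : (List.range' prev.toNat (p - prev).toNat).map
        (fun (k : Nat) => if ((k : Int) ∈ p :: tl) then '⬜' else '⬛')
        = PySem.List.pyRepeat ['⬛'] (p - prev) := by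
      rw [PySem.List.pyRepeat_singleton]
      rw [List.map_congr_left (g := fun _ => '⬛')]
      · rw [List.map_const', List.length_range']
      · intro k hk
        have hk' := List.mem_range'_1.mp hk
        have hk2 : (k : Int) < p := by omega
        have : ¬ ((k : Int) ∈ p :: tl) := by
          intro hc
          rcases List.mem_cons.mp hc with h | h
          · omega
          · have := hhead _ h; omega
        simp [this]
    have hmid2 : (if (((p.toNat : Nat) : Int) ∈ p :: tl) then '⬜' else '⬛') = '⬜' := by
      have : ((p.toNat : Nat) : Int) = p := by omega
      rw [this, if_pos (List.mem_cons_self ..)]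
    have hseg3 : (List.range' (p.toNat + 1) (N - (p + 1)).toNat).map
        (fun (k : Nat) => if ((k : Int) ∈ p :: tl) then '⬜' else '⬛')
        = (List.range' (p + 1).toNat (N - (p + 1)).toNat).map
            (fun (k : Nat) => if ((k : Int) ∈ tl) then '⬜' else '⬛') := by
      have : p.toNat + 1 = (p + 1).toNat := by omega
      rw [this]
      apply List.map_congr_left
      intro k hk
      have hk' := List.mem_range'_1.mp hk
      have hkp : p < (k : Int) := by omega
      have : ((k : Int) ∈ p :: tl) ↔ ((k : Int) ∈ tl) := by
        simp only [List.mem_cons]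
        constructor
        · rintro (h | h); · omega
          · exact h
        · exact fun h => Or.inr h
      rw [if_congr this rfl rfl]
    rw [hseg1, hmid2, hseg3]
    simp [List.append_assoc]

-- x*C+y with 0 ≤ y,j < C determines (x,y) uniquely
theorem rdDecomp {C x y i j : Int} (hC : 0 < C) (hy : 0 ≤ y) (hyC : y < C)
    (hj : 0 ≤ j) (hjC : j < C) (h : x * C + y = i * C + j) : x = i ∧ y = j := by
  have hx : x = i := by
    by_contra hne
    rcases lt_or_gt_of_ne hne with hlt | hgt
    · have h1 : x + 1 ≤ i := by omega
      nlinarith [mul_le_mul_of_nonneg_right h1 (le_of_lt hC)]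
    · have h1 : i + 1 ≤ x := by omega
      nlinarith [mul_le_mul_of_nonneg_right h1 (le_of_lt hC)]
  exact ⟨hx, by subst hx; linarith⟩

-- ===== VERDICT (by name: the statement is the Claim_ definition above) =====
theorem rendered_dots_spec : Claim_equal_rendered_dots := by
  intro points hdom hpre
  obtain ⟨hne, hnn⟩ := hpre
  obtain ⟨mx, hmx⟩ : ∃ m, PySem.List.max? (points.map (fun p => p.1)) (fun x => x) = some m := by
    cases h : PySem.List.max? (points.map (fun p => p.1)) (fun x => x) with
    | none => rw [PySem.List.max?_eq_none_iff] at h; simp [hne] at h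
    | some m => exact ⟨m, rfl⟩
  obtain ⟨my, hmy⟩ : ∃ m, PySem.List.max? (points.map (fun p => p.2)) (fun x => x) = some m := by
    cases h : PySem.List.max? (points.map (fun p => p.2)) (fun x => x) with
    | none => rw [PySem.List.max?_eq_none_iff] at h; simp [hne] at h
    | some m => exact ⟨m, rfl⟩
  have hmx0 : 0 ≤ mx := by
    obtain ⟨p, hp, hpe⟩ := List.mem_map.mp (PySem.List.max?_mem hmx)
    have := hnn p hp; omega
  have hmy0 : 0 ≤ my := by
    obtain ⟨p, hp, hpe⟩ := List.mem_map.mp (PySem.List.max?_mem hmy)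
    have := hnn p hp; omega
  have hxb : ∀ p ∈ points, p.1 ≤ mx :=
    fun p hp => PySem.List.max?_isMax hmx p.1 (List.mem_map_of_mem hp)
  have hyb : ∀ p ∈ points, p.2 ≤ my :=
    fun p hp => PySem.List.max?_isMax hmy p.2 (List.mem_map_of_mem hp)
  -- abbreviations
  have hC0 : (0 : Int) < my + 1 := by omega
  have hCint : (((my + 1).toNat : Nat) : Int) = my + 1 := by omega
  show rendered_dots points = rendered_dots_alt points
  unfold rendered_dots rendered_dots_alt
  rw [hmx, hmy]
  simp only []
  apply congrArg String.ofList
  -- ===== A side: the plotted matrix, rendered =====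
  have hM0 : (PySem.List.pyRange 0 (mx + 1)).map (fun _ => PySem.List.pyRepeat ['⬛'] (my + 1))
      = rdMk2 (mx + 1).toNat (my + 1).toNat (fun _ _ => '⬛') := by
    rw [rdRange_map]
    unfold rdMk2
    apply List.map_congr_left
    intro i _
    rw [PySem.List.pyRepeat_singleton, List.map_const', List.length_range]
  rw [hM0,
      rdFoldl_plot points (fun _ _ => '⬛')
        (fun p hp => ⟨(hnn p hp).1, by have := hxb p hp; omega,
                      (hnn p hp).2, by have := hyb p hp; omega⟩),
      rdRender_eq]
  apply congrArg ('\n' :: ·)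
  unfold rdMk2
  rw [List.flatMap_map, rdRange_flatMap]
  -- ===== B side: run-length emission over the sorted linearized positions =====
  have hmemps : ∀ z : Int, (z ∈ PySem.List.sorted
        (PySem.Set.ofList (points.map (fun p => p.1 * (my + 1) + p.2))) (fun x => x) false)
      ↔ (∃ p ∈ points, p.1 * (my + 1) + p.2 = z) := by
    intro z
    rw [PySem.List.mem_sorted, PySem.Set.mem_ofList, List.mem_map]
  have hcells := rdEmit
    (PySem.List.sorted (PySem.Set.ofList (points.map (fun p => p.1 * (my + 1) + p.2))) (fun x => x) false)
    ((mx + 1) * (my + 1)) [] 0 (le_refl 0)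
    (PySem.List.sorted_ofList_pairwise_lt _)
    (by
      intro z hz
      obtain ⟨p, hp, he⟩ := (hmemps z).mp hz
      have h1 := (hnn p hp).1
      have h2 := (hnn p hp).2
      nlinarith)
    (by
      intro z hz
      obtain ⟨p, hp, he⟩ := (hmemps z).mp hz
      have h1 := hxb p hp
      have h2 := (hnn p hp).2
      have h3 := hyb p hp
      nlinarith)
    (by positivity)
  simp only [Int.toNat_zero, Int.sub_zero, List.nil_append] at hcells
  rw [hcells]
  apply List.flatMap_congr
  intro i hi
  have hiR : i < (mx + 1).toNat := List.mem_range.mp hi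
  apply congrArg (· ++ ['\n'])
  -- row i of B is the slice [i*C, (i+1)*C) of the flat indicator list
  have hb1 : (i : Int) * (my + 1) = ((i * (my + 1).toNat : Nat) : Int) := by
    push_cast
    rw [hCint]
  have hb2 : ((i : Int) + 1) * (my + 1) = (((i + 1) * (my + 1).toNat : Nat) : Int) := by
    push_cast
    rw [hCint]
  rw [hb1, hb2, PySem.List.slice_natCast]
  have htk : (i + 1) * (my + 1).toNat - i * (my + 1).toNat = (my + 1).toNat := by
    rw [Nat.succ_mul]; omega
  rw [htk]
  -- compare elementwise
  have hNn : ((mx + 1) * (my + 1)).toNat = (mx + 1).toNat * (my + 1).toNat := by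
    rw [← Int.toNat_mul (by omega) (by omega)]
  have hlen : i * (my + 1).toNat + (my + 1).toNat ≤ (mx + 1).toNat * (my + 1).toNat := by
    have := Nat.mul_le_mul_right (my + 1).toNat (show i + 1 ≤ (mx + 1).toNat by omega)
    rw [Nat.succ_mul] at this
    omega
  apply List.ext_getElem
  · simp [List.length_take, List.length_drop, List.length_map, List.length_range']
    omega
  · intro j hj1 hj2
    have hjC : j < (my + 1).toNat := by
      simp at hj1
      omega
    simp only [List.getElem_take, List.getElem_drop, List.getElem_map, List.getElem_range,
      List.getElem_range']
    have hmem : (((i * (my + 1).toNat + j : Nat) : Int) ∈ PySem.List.sorted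
        (PySem.Set.ofList (points.map (fun p => p.1 * (my + 1) + p.2))) (fun x => x) false)
        ↔ (((i : Int), (j : Int)) ∈ points) := by
      rw [hmemps]
      constructor
      · rintro ⟨p, hp, he⟩
        have hyC' : p.2 < my + 1 := by have := hyb p hp; omega
        have hj0 : (0 : Int) ≤ (j : Int) := by omega
        have hjC' : (j : Int) < my + 1 := by omega
        have heq : p.1 * (my + 1) + p.2 = (i : Int) * (my + 1) + (j : Int) := by
          rw [he]; push_cast; rw [hCint]
        have hd := rdDecomp hC0 (hnn p hp).2 hyC' hj0 hjC' heq
        have hpe : p = ((i : Int), (j : Int)) := by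
          rw [Prod.ext_iff]; exact hd
        rwa [← hpe]
      · intro hp
        refine ⟨((i : Int), (j : Int)), hp, ?_⟩
        push_cast
        rw [hCint]
    rw [show 0 + 1 * (i * (my + 1).toNat + j) = i * (my + 1).toNat + j from by omega]
    rw [if_congr hmem rfl rfl]
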